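-- pv_equiv track=rewrite | github.com/Insori/CondingTest-python | test0508.py | solution
-- ===== SOURCE A (Python) =====
-- def solution(d, budget):
--     answer = 0
--     total = 0
--     d.sort()
--     for i in d:
--         total += i
--         if total > budget:
--             break
--         answer += 1
--     return answer
-- ===== SOURCE B (Python) =====
-- def solution(d, budget):
--     # Quickselect-style divide and conquer: partition around a pivot instead of
--     # sorting. Purchases happen in increasing price order: recurse on the cheaper
--     # part; if it is bought out, buy the pivot-priced copies by arithmetic
--     # (they all cost the same), then recurse on the pricier part. d is not mutated.
--     def count(items, budget):
--         if not items:
--             return 0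
--         p = items[len(items) // 2]
--         less = [x for x in items if x < p]
--         r = count(less, budget)
--         if r < len(less):
--             return r
--         budget -= sum(less)
--         if p > budget:
--             return len(less)
--         neq = len([x for x in items if x == p])
--         if p > 0:
--             k = budget // p
--             if k < neq:
--                 return len(less) + k
--         greater = [x for x in items if x > p]
--         return len(less) + neq + count(greater, budget - neq * p)
--     return count(d, budget)
-- ===== Notes on version B (the rewrite author's own statement) =====
-- stated objective: alternative
-- what changed: Replaced sort-then-prefix-scan by quickselect-style divide and conquer: partition around a middle pivot, recurse on the cheaper part, buy the pivot-priced copies by one floor division, recurse on the pricier part with the remaining budget; no sort, and B does not mutate d while A sorts it in place.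
import Mathlib
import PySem

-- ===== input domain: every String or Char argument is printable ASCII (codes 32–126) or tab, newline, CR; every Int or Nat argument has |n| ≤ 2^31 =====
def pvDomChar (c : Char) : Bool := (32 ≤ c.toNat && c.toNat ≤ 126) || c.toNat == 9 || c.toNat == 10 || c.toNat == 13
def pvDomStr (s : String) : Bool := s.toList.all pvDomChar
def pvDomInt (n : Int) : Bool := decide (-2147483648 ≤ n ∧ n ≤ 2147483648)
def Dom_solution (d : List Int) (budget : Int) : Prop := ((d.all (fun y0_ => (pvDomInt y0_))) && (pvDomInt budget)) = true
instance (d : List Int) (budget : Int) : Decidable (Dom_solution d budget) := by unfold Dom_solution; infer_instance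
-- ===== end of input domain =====

-- B replaces sort-then-prefix-scan by quickselect-style divide and conquer (partition
-- around a pivot, buy the pivot-priced copies by arithmetic, recurse on each side);
-- return values agree, but A sorts `d` in place while B leaves `d` unmutated
-- (the equivalence proved here is about the RETURN value only).

-- ===== PORT A =====
-- the `for i in d` loop with `break`: carries (total, answer), stops when total > budget
def solutionLoop (budget : Int) : List Int → Int → Int → Int
  | [], _, answer => answer
  | i :: rest, total, answer =>
    let total' := total + i
    if total' > budget then answer else solutionLoop budget rest total' (answer + 1)

def solution (d : List Int) (budget : Int) : Int :=
  solutionLoop budget (PySem.List.sorted d (fun x => x)) 0 0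

-- ===== PORT B =====
-- the recursive helper `count(items, budget)` of Source B; the none-branch of the pivot
-- lookup items[len(items)//2] is unreachable (a valid index on a nonempty list)
def countQS (items : List Int) (budget : Int) : Int :=
  match hi : items with
  | [] => 0
  | _ :: _ =>
    match hg : PySem.List.pyGet? items (PySem.Int.floordiv (items.length : Int) 2) with
    | none => 0
    | some p =>
      let less := items.filter (fun x => decide (x < p))
      let r := countQS less budget
      if r < (less.length : Int) then r
      else
        let b1 := budget - less.sum
        if p > b1 then (less.length : Int)
        else
          let neq : Int := (items.filter (fun x => x == p)).length
          if p > 0 then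
            if PySem.Int.floordiv b1 p < neq then
              (less.length : Int) + PySem.Int.floordiv b1 p
            else
              (less.length : Int) + neq +
                countQS (items.filter (fun x => decide (p < x))) (b1 - neq * p)
          else
            (less.length : Int) + neq +
              countQS (items.filter (fun x => decide (p < x))) (b1 - neq * p)
termination_by items.length
decreasing_by
  all_goals
    have hmem : p ∈ items := PySem.List.mem_of_pyGet?_eq_some _ hg
    subst hi
    simp only [List.length_unattach]
    refine Nat.lt_of_lt_of_le
      (List.length_filter_lt_length_iff_exists.mpr ⟨⟨p, hmem⟩, List.mem_attach _ _, by simp⟩)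
      (by simp)

def solution_alt (d : List Int) (budget : Int) : Int :=
  countQS d budget

-- ===== PRECONDITION & SPEC =====
def Spec_solution (d : List Int) (budget : Int) (out : Int) : Prop := out = solution_alt d budget
instance (d : List Int) (budget : Int) (out : Int) : Decidable (Spec_solution d budget out) := by unfold Spec_solution; infer_instance

-- ===== CLAIM (what is proved, stated in full; the proofs are below) =====
def Claim_equal_solution : Prop := ∀ (d : List Int) (budget : Int), Dom_solution d budget → Spec_solution d budget (solution d budget)

-- ===== LEMMAS AND PROOFS =====

-- common reference: count of the greedy prefix, carrying the remaining budget
def cnt (budget : Int) : List Int → Int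
  | [] => 0
  | i :: rest => if i > budget then 0 else 1 + cnt (budget - i) rest

theorem solutionLoop_eq_cnt (budget : Int) (l : List Int) :
    ∀ (t ans : Int), solutionLoop budget l t ans = ans + cnt (budget - t) l := by
  induction l with
  | nil => intro t ans; simp [solutionLoop, cnt]
  | cons i rest ih =>
    intro t ans
    simp only [solutionLoop, cnt]
    by_cases h : t + i > budget
    · rw [if_pos h, if_pos (by omega)]; ring
    · rw [if_neg h, if_neg (by omega), ih]
      have : budget - t - i = budget - (t + i) := by ring
      rw [this]; ring

theorem cnt_nonneg (l : List Int) : ∀ b, 0 ≤ cnt b l := by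
  induction l with
  | nil => intro b; simp [cnt]
  | cons i rest ih =>
    intro b
    simp only [cnt]
    split
    · exact le_refl 0
    · have := ih (b - i); omega

theorem cnt_le_length (l : List Int) : ∀ b, cnt b l ≤ l.length := by
  induction l with
  | nil => intro b; simp [cnt]
  | cons i rest ih =>
    intro b
    simp only [cnt, List.length_cons]
    split
    · push_cast
      have := cnt_nonneg rest (b - i)
      omega
    · have h1 := ih (b - i)
      push_cast
      omega

theorem cnt_append_lt (xs ys : List Int) :
    ∀ b, cnt b xs < xs.length → cnt b (xs ++ ys) = cnt b xs := by
  induction xs with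
  | nil => intro b h; simp [cnt] at h
  | cons i rest ih =>
    intro b h
    simp only [cnt, List.cons_append, List.length_cons] at *
    split
    · rfl
    · next hle =>
      rw [if_neg hle] at h
      rw [ih (b - i) (by push_cast at h ⊢; omega)]

theorem cnt_append_full (xs ys : List Int) :
    ∀ b, cnt b xs = xs.length → cnt b (xs ++ ys) = xs.length + cnt (b - xs.sum) ys := by
  induction xs with
  | nil => intro b h; simp
  | cons i rest ih =>
    intro b h
    simp only [cnt, List.cons_append, List.length_cons, List.sum_cons] at *
    split
    · next hgt =>
      rw [if_pos hgt] at h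
      have := cnt_nonneg rest (b - i)
      push_cast at h; omega
    · next hle =>
      rw [if_neg hle] at h
      have hfull : cnt (b - i) rest = rest.length := by push_cast at h ⊢; omega
      rw [ih (b - i) hfull]
      have : b - i - rest.sum = b - (i + rest.sum) := by ring
      rw [this]; push_cast; ring

theorem cnt_replicate_stop (n : Nat) (b p : Int) (h : p > b) :
    cnt b (List.replicate n p) = 0 := by
  cases n with
  | zero => simp [cnt]
  | succ m => simp [List.replicate, cnt, h]

theorem cnt_replicate_nonpos (n : Nat) (p : Int) (hp : p ≤ 0) :
    ∀ b, p ≤ b → cnt b (List.replicate n p) = n := by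
  induction n with
  | zero => intro b _; simp [cnt]
  | succ m ih =>
    intro b hb
    simp only [List.replicate, cnt, if_neg (not_lt.mpr hb)]
    rw [ih (b - p) (by omega)]
    push_cast; ring

theorem cnt_replicate_pos (n : Nat) (p : Int) (hp : 0 < p) :
    ∀ b, p ≤ b → cnt b (List.replicate n p) = min (n : Int) (PySem.Int.floordiv b p) := by
  induction n with
  | zero =>
    intro b hb
    have h1 : (1 : Int) ≤ PySem.Int.floordiv b p :=
      (PySem.Int.le_floordiv_iff_mul_le hp).mpr (by omega)
    simp [cnt]; omega
  | succ m ih =>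
    intro b hb
    obtain ⟨hlo, hhi⟩ := (PySem.Int.floordiv_eq_iff_of_pos (a := b) hp).mp rfl
    simp only [List.replicate, cnt, if_neg (not_lt.mpr hb)]
    by_cases h2 : p ≤ b - p
    · rw [ih (b - p) h2]
      have hsub : PySem.Int.floordiv (b - p) p = PySem.Int.floordiv b p - 1 := by
        refine (PySem.Int.floordiv_eq_iff_of_pos hp).mpr ⟨?_, ?_⟩ <;> nlinarith
      rw [hsub]
      omega
    · rw [cnt_replicate_stop m (b - p) p (by omega)]
      have h1 : PySem.Int.floordiv b p = 1 := by
        refine (PySem.Int.floordiv_eq_iff_of_pos hp).mpr ⟨by omega, by nlinarith⟩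
      rw [h1]
      push_cast; omega

-- sorting splits around any pivot value into the three partition classes
theorem sorted_partition (items : List Int) (p : Int) :
    PySem.List.sorted items (fun x => x)
      = PySem.List.sorted (items.filter (fun x => decide (x < p))) (fun x => x)
        ++ (items.filter (fun x => x == p)
        ++ PySem.List.sorted (items.filter (fun x => decide (p < x))) (fun x => x)) := by
  apply PySem.List.sorted_id_eq_of_perm_of_pairwise
  · -- the concatenation is a permutation of items
    have h1 : (items.filter (fun x => decide (x < p))
        ++ items.filter (fun x => !decide (x < p))).Perm items :=
      List.filter_append_perm _ items
    have h2 : ((items.filter (fun x => !decide (x < p))).filter (fun x => x == p)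
        ++ (items.filter (fun x => !decide (x < p))).filter (fun x => !(x == p))).Perm
        (items.filter (fun x => !decide (x < p))) :=
      List.filter_append_perm _ _
    have he : (items.filter (fun x => !decide (x < p))).filter (fun x => x == p)
        = items.filter (fun x => x == p) := by
      rw [List.filter_filter]
      refine List.filter_congr ?_
      intro x _
      by_cases hx : x = p
      · subst hx; simp
      · simp [hx]
    have hg : (items.filter (fun x => !decide (x < p))).filter (fun x => !(x == p))
        = items.filter (fun x => decide (p < x)) := by
      rw [List.filter_filter]
      refine List.filter_congr ?_
      intro x _
      by_cases hx : x = p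
      · subst hx; simp
      · rcases lt_trichotomy x p with h | h | h
        · simp [h, not_lt.mpr (le_of_lt h)]
        · exact absurd h hx
        · simp [h, not_lt.mpr (le_of_lt h), hx]
    rw [he, hg] at h2
    refine List.Perm.trans ?_ h1
    refine List.Perm.trans
      ((PySem.List.sorted_perm ..).append ((List.Perm.refl _).append (PySem.List.sorted_perm ..))) ?_
    exact List.Perm.append_left _ h2
  · -- the concatenation is ≤-pairwise
    rw [List.pairwise_append]
    refine ⟨PySem.List.sorted_pairwise .., ?_, ?_⟩
    · rw [List.pairwise_append]
      refine ⟨?_, PySem.List.sorted_pairwise .., ?_⟩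
      · refine List.pairwise_of_forall_mem_list ?_
        intro x hx y hy
        have hx' : x = p := eq_of_beq (List.mem_filter.mp hx).2
        have hy' : y = p := eq_of_beq (List.mem_filter.mp hy).2
        omega
      · intro a ha b hb
        have ha' : a = p := eq_of_beq (List.mem_filter.mp ha).2
        have hb' : p < b := by
          have := (List.mem_filter.mp ((PySem.List.mem_sorted ..).mp hb)).2
          simpa using this
        omega
    · intro a ha b hb
      have ha' : a < p := by
        have := (List.mem_filter.mp ((PySem.List.mem_sorted ..).mp ha)).2
        simpa using this
      rcases List.mem_append.mp hb with hb | hb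
      · have : b = p := eq_of_beq (List.mem_filter.mp hb).2
        omega
      · have : p < b := by
          have := (List.mem_filter.mp ((PySem.List.mem_sorted ..).mp hb)).2
          simpa using this
        omega

theorem countQS_eq_cnt (n : Nat) : ∀ (items : List Int), items.length = n →
    ∀ b, countQS items b = cnt b (PySem.List.sorted items (fun x => x)) := by
  induction n using Nat.strong_induction_on with
  | _ n ih =>
    intro items hlen b
    match items with
    | [] => simp [countQS, cnt, show PySem.List.sorted ([] : List Int) (fun x => x) = [] from rfl]
    | a :: tl =>
      rw [countQS]
      split
      next hg =>
        exfalso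
        have hnr := (PySem.List.pyGet?_eq_none_iff ..).mp hg
        apply hnr
        rw [PySem.Int.floordiv_eq_ediv_of_pos (by omega)]
        constructor <;> (simp only [List.length_cons]; push_cast; omega)
      next p hg =>
        dsimp only
        have hmem : p ∈ a :: tl := PySem.List.mem_of_pyGet?_eq_some _ hg
        rw [sorted_partition (a :: tl) p]
        generalize hless : List.filter (fun x => decide (x < p)) (a :: tl) = less
        generalize heqs0 : List.filter (fun x => x == p) (a :: tl) = eqs
        generalize hgtr : List.filter (fun x => decide (p < x)) (a :: tl) = gtr
        have hlessn : less.length < n := by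
          rw [← hless, ← hlen]
          exact List.length_filter_lt_length_iff_exists.mpr ⟨p, hmem, by simp⟩
        have hgtrn : gtr.length < n := by
          rw [← hgtr, ← hlen]
          exact List.length_filter_lt_length_iff_exists.mpr ⟨p, hmem, by simp⟩
        have hneq1 : 1 ≤ eqs.length := by
          rw [← heqs0]
          exact List.length_pos_of_mem (List.mem_filter.mpr ⟨hmem, by simp⟩)
        have heqrep : eqs = List.replicate eqs.length p := by
          refine List.eq_replicate_of_mem ?_
          intro x hx
          rw [← heqs0] at hx
          exact eq_of_beq (List.mem_filter.mp hx).2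
        rw [ih less.length hlessn less rfl b]
        have hsl : (PySem.List.sorted less (fun x => x)).length = less.length :=
          PySem.List.length_sorted ..
        by_cases hr : cnt b (PySem.List.sorted less (fun x => x)) < (less.length : Int)
        · rw [if_pos hr, cnt_append_lt _ _ b (by omega)]
        · rw [if_neg hr]
          have hfull : cnt b (PySem.List.sorted less (fun x => x))
              = ((PySem.List.sorted less (fun x => x)).length : Int) := by
            have := cnt_le_length (PySem.List.sorted less (fun x => x)) b
            omega
          rw [cnt_append_full _ _ b hfull]
          have hsum : (PySem.List.sorted less (fun x => x)).sum = less.sum :=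
            (PySem.List.sorted_perm ..).sum_eq
          rw [hsum, hsl]
          by_cases hstop : p > b - less.sum
          · rw [if_pos hstop]
            have hcnt0 : cnt (b - less.sum) eqs = 0 := by
              conv_lhs => rw [heqrep]
              exact cnt_replicate_stop _ _ _ hstop
            rw [cnt_append_lt _ _ _ (by rw [hcnt0]; omega), hcnt0]
            omega
          · rw [if_neg hstop]
            have hble : p ≤ b - less.sum := not_lt.mp hstop
            by_cases hppos : p > 0
            · rw [if_pos hppos]
              have hrep : cnt (b - less.sum) eqs
                  = min (eqs.length : Int) (PySem.Int.floordiv (b - less.sum) p) := by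
                conv_lhs => rw [heqrep]
                rw [cnt_replicate_pos _ _ hppos _ hble]
              by_cases hk : PySem.Int.floordiv (b - less.sum) p < (eqs.length : Int)
              · rw [if_pos hk, cnt_append_lt _ _ _ (by rw [hrep]; omega), hrep]
                omega
              · rw [if_neg hk, cnt_append_full _ _ _ (by rw [hrep]; omega)]
                have hsum2 : eqs.sum = (eqs.length : Int) * p := by
                  conv_lhs => rw [heqrep]
                  simp [List.sum_replicate]
                rw [hsum2, ← ih gtr.length hgtrn gtr rfl]
                exact add_assoc _ _ _
            · rw [if_neg hppos]
              have hrep : cnt (b - less.sum) eqs = (eqs.length : Int) := by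
                conv_lhs => rw [heqrep]
                rw [cnt_replicate_nonpos _ _ (not_lt.mp hppos) _ hble]
              rw [cnt_append_full _ _ _ hrep]
              have hsum2 : eqs.sum = (eqs.length : Int) * p := by
                conv_lhs => rw [heqrep]
                simp [List.sum_replicate]
              rw [hsum2, ← ih gtr.length hgtrn gtr rfl]
              exact add_assoc _ _ _

-- ===== VERDICT (by name: the statement is the Claim_ definition above) =====
theorem solution_spec : Claim_equal_solution := by
  intro d budget _
  unfold Spec_solution solution solution_alt
  rw [solutionLoop_eq_cnt, countQS_eq_cnt d.length d rfl]
  simp
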